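-- pv_equiv track=rewrite | github.com/ShajeshJ/adventofcode_2023 | days/day10/solutions.py | upscale_times_3
-- ===== SOURCE A (Python) =====
-- def upscale_times_3(char_map: list[str]) -> list[str]:
--     new_map: list[str] = []
--
--     for row in char_map:
--         new_map.extend(["", "", ""])
--         for ch in row:
--             if ch == ".":
--                 new_map[-3] += "..."
--                 new_map[-2] += "..."
--                 new_map[-1] += "..."
--             elif ch == "o":
--                 new_map[-3] += "ooo"
--                 new_map[-2] += "ooo"
--                 new_map[-1] += "ooo"
--             elif ch == "|":
--                 new_map[-3] += ".|."
--                 new_map[-2] += ".|."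
--                 new_map[-1] += ".|."
--             elif ch == "-":
--                 new_map[-3] += "..."
--                 new_map[-2] += "---"
--                 new_map[-1] += "..."
--             elif ch == "L":
--                 new_map[-3] += ".|."
--                 new_map[-2] += ".L-"
--                 new_map[-1] += "..."
--             elif ch == "J":
--                 new_map[-3] += ".|."
--                 new_map[-2] += "-J."
--                 new_map[-1] += "..."
--             elif ch == "7":
--                 new_map[-3] += "..."
--                 new_map[-2] += "-7."
--                 new_map[-1] += ".|."
--             elif ch == "F":
--                 new_map[-3] += "..."
--                 new_map[-2] += ".F-"
--                 new_map[-1] += ".|."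
--             else:
--                 raise ValueError(f"Unknown character {ch}")
--
--     return new_map
-- ===== SOURCE B (Python) =====
-- _CHARS = ".o|-LJ7F"
-- _TOP = str.maketrans(dict(zip(_CHARS, ["...", "ooo", ".|.", "...", ".|.", ".|.", "...", "..."])))
-- _MID = str.maketrans(dict(zip(_CHARS, ["...", "ooo", ".|.", "---", ".L-", "-J.", "-7.", ".F-"])))
-- _BOT = str.maketrans(dict(zip(_CHARS, ["...", "ooo", ".|.", "...", "...", "...", ".|.", ".|."])))
--
-- def upscale_times_3(char_map: list[str]) -> list[str]:
--     new_map: list[str] = []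
--     for row in char_map:
--         bad = next((ch for ch in row if ch not in _CHARS), None)
--         if bad is not None:
--             raise ValueError(f"Unknown character {bad}")
--         new_map += [row.translate(_TOP), row.translate(_MID), row.translate(_BOT)]
--     return new_map
-- ===== Notes on version B (the rewrite author's own statement) =====
-- stated objective: alternative
-- what changed: Replaces A's interleaved per-character if/elif loop mutating the last three list entries with band-wise whole-row str.translate calls using three precomputed translation tables (after a validation scan that raises the same ValueError at the first unknown character).
import Mathlib
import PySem

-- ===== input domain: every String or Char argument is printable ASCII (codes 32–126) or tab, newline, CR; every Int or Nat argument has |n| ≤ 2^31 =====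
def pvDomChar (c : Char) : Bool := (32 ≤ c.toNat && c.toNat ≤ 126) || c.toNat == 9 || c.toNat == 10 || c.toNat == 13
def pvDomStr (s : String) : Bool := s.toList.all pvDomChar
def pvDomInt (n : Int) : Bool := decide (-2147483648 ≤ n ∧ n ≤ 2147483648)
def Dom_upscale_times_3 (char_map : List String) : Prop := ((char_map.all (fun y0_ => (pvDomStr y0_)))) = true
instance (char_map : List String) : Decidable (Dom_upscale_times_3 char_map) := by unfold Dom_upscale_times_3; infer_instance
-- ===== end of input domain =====

-- B replaces A's interleaved per-character if/elif loop (mutating the last three rows)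
-- with band-wise whole-row str.translate over three precomputed tables; objective: alternative.

-- ===== PORT A =====
-- inner character loop of A: the three += accumulators for the last three rows,
-- branches in A's order; the final `else` is Python's raise (excluded by Pre_).
def upA_row : List Char → String → String → String → String × String × String
  | [], t, m, b => (t, m, b)
  | ch :: rest, t, m, b =>
    if ch = '.' then upA_row rest (t ++ "...") (m ++ "...") (b ++ "...")
    else if ch = 'o' then upA_row rest (t ++ "ooo") (m ++ "ooo") (b ++ "ooo")
    else if ch = '|' then upA_row rest (t ++ ".|.") (m ++ ".|.") (b ++ ".|.")
    else if ch = '-' then upA_row rest (t ++ "...") (m ++ "---") (b ++ "...")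
    else if ch = 'L' then upA_row rest (t ++ ".|.") (m ++ ".L-") (b ++ "...")
    else if ch = 'J' then upA_row rest (t ++ ".|.") (m ++ "-J.") (b ++ "...")
    else if ch = '7' then upA_row rest (t ++ "...") (m ++ "-7.") (b ++ ".|.")
    else if ch = 'F' then upA_row rest (t ++ "...") (m ++ ".F-") (b ++ ".|.")
    else (t, m, b)  -- raise ValueError in Python: outside Pre_

def upscale_times_3 (char_map : List String) : List String :=
  char_map.foldl (fun new_map row =>
    let r := upA_row row.toList "" "" ""
    new_map ++ [r.1, r.2.1, r.2.2]) []

-- ===== PORT B =====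
-- B's three translation tables (str.maketrans dicts) as association lists
def pipeChars : List Char := ['.', 'o', '|', '-', 'L', 'J', '7', 'F']

def topT : List (Char × String) :=
  pipeChars.zip ["...", "ooo", ".|.", "...", ".|.", ".|.", "...", "..."]
def midT : List (Char × String) :=
  pipeChars.zip ["...", "ooo", ".|.", "---", ".L-", "-J.", "-7.", ".F-"]
def botT : List (Char × String) :=
  pipeChars.zip ["...", "ooo", ".|.", "...", "...", "...", ".|.", ".|."]

-- str.translate: each character is replaced by its table image (unmapped chars kept)
def pyTranslate (tab : List (Char × String)) (s : String) : String :=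
  String.join (s.toList.map (fun c => (tab.lookup c).getD (String.singleton c)))

def upscale_times_3_alt (char_map : List String) : List String :=
  char_map.foldl (fun new_map row =>
    match row.toList.find? (fun c => !pipeChars.contains c) with
    | some _ => new_map  -- Python raises ValueError here: outside Pre_
    | none => new_map ++ [pyTranslate topT row, pyTranslate midT row, pyTranslate botT row]) []

-- ===== PRECONDITION & SPEC =====
-- Pre_ excludes exactly the inputs containing a character outside the pipe alphabet,
-- on which Python A raises ValueError (and B raises the same ValueError).
def Pre_upscale_times_3 (char_map : List String) : Prop :=
  char_map.all (fun row => row.toList.all (fun c => pipeChars.contains c)) = true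
instance (char_map : List String) : Decidable (Pre_upscale_times_3 char_map) := by
  unfold Pre_upscale_times_3; infer_instance
def pvWitness_upscale_times_3 : List String := ["L7"]

def Spec_upscale_times_3 (char_map : List String) (out : List String) : Prop := out = upscale_times_3_alt char_map
instance (char_map : List String) (out : List String) : Decidable (Spec_upscale_times_3 char_map out) := by unfold Spec_upscale_times_3; infer_instance

-- ===== CLAIM =====
def Claim_equal_upscale_times_3 : Prop := ∀ (char_map : List String), Dom_upscale_times_3 char_map → Pre_upscale_times_3 char_map → Spec_upscale_times_3 char_map (upscale_times_3 char_map)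

-- ===== LEMMAS AND PROOFS =====
theorem foldl_append (l : List String) :
    ∀ a : String, l.foldl (· ++ ·) a = a ++ l.foldl (· ++ ·) "" := by
  induction l with
  | nil => intro a; simp
  | cons s rest ih =>
    intro a
    simp only [List.foldl_cons]
    rw [ih (a ++ s), ih ("" ++ s)]
    simp [String.append_assoc]

theorem join_cons (a : String) (l : List String) :
    String.join (a :: l) = a ++ String.join l := by
  simp [String.join]
  exact foldl_append l a

-- per-row agreement: A's accumulator loop equals the three band translations
theorem upA_row_eq (cs : List Char)
    (h : ∀ ch ∈ cs, pipeChars.contains ch = true) :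
    ∀ t m b : String, upA_row cs t m b =
      (t ++ String.join (cs.map (fun c => ((topT.lookup c).getD (String.singleton c)))),
       m ++ String.join (cs.map (fun c => ((midT.lookup c).getD (String.singleton c)))),
       b ++ String.join (cs.map (fun c => ((botT.lookup c).getD (String.singleton c))))) := by
  induction cs with
  | nil => intro t m b; simp [upA_row, String.join]
  | cons ch rest ih =>
    intro t m b
    have hc := h ch (List.mem_cons_self ..)
    have hrest : ∀ c ∈ rest, pipeChars.contains c = true :=
      fun c hm => h c (List.mem_cons_of_mem _ hm)
    simp only [pipeChars, List.contains_eq_mem, List.mem_cons, List.not_mem_nil, or_false,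
      decide_eq_true_eq] at hc
    rcases hc with hc | hc | hc | hc | hc | hc | hc | hc <;> subst hc <;>
      simp [upA_row, topT, midT, botT, pipeChars, List.lookup, ih hrest, join_cons,
        String.append_assoc]

theorem foldl_eq (char_map : List String)
    (h : ∀ row ∈ char_map, ∀ ch ∈ row.toList, pipeChars.contains ch = true) :
    ∀ acc : List String,
      char_map.foldl (fun new_map row =>
        let r := upA_row row.toList "" "" ""
        new_map ++ [r.1, r.2.1, r.2.2]) acc =
      char_map.foldl (fun new_map row =>
        match row.toList.find? (fun c => !pipeChars.contains c) with
        | some _ => new_map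
        | none => new_map ++ [pyTranslate topT row, pyTranslate midT row, pyTranslate botT row]) acc := by
  induction char_map with
  | nil => intro acc; rfl
  | cons row rest ih =>
    intro acc
    have hrow := h row (List.mem_cons_self ..)
    have hrest : ∀ r ∈ rest, ∀ ch ∈ r.toList, pipeChars.contains ch = true :=
      fun r hm => h r (List.mem_cons_of_mem _ hm)
    have hfind : row.toList.find? (fun c => !pipeChars.contains c) = none := by
      rw [List.find?_eq_none]
      intro c hc
      simp [List.contains_eq_mem] at hrow ⊢
      exact hrow c hc
    simp only [List.foldl_cons, hfind]
    rw [upA_row_eq row.toList hrow]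
    simp [ih hrest, pyTranslate]

-- ===== VERDICT =====
theorem upscale_times_3_spec : Claim_equal_upscale_times_3 := by
  intro char_map _ hpre
  unfold Pre_upscale_times_3 at hpre
  simp only [List.all_eq_true] at hpre
  unfold Spec_upscale_times_3 upscale_times_3 upscale_times_3_alt
  exact foldl_eq char_map (fun r hr c hc => by
    have := hpre r hr c hc
    simpa using this) []
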